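-- pv_equiv track=rewrite | github.com/PowerLay/wordlySolver | bot/bot.py | remove_repeating_letters
-- ===== SOURCE A (Python) =====
-- def remove_repeating_letters(res):
--     out_res = []
--     for w in res:
--         for c in w:
--             if w.count(c) > 1:
--                 break
--         else:
--             out_res.append(w)
--     return out_res
-- ===== SOURCE B (Python) =====
-- def remove_repeating_letters(res):
--     out_res = []
--     for w in res:
--         s = sorted(w)
--         if all(a != b for a, b in zip(s, s[1:])):
--             out_res.append(w)
--     return out_res
-- ===== Notes on version B (the rewrite author's own statement) =====
-- stated objective: alternative
-- what changed: B sorts each word's letters once and checks that no two adjacent characters of the sorted word are equal, instead of A's per-character w.count scan (repeated full passes over the word).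
import Mathlib
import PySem

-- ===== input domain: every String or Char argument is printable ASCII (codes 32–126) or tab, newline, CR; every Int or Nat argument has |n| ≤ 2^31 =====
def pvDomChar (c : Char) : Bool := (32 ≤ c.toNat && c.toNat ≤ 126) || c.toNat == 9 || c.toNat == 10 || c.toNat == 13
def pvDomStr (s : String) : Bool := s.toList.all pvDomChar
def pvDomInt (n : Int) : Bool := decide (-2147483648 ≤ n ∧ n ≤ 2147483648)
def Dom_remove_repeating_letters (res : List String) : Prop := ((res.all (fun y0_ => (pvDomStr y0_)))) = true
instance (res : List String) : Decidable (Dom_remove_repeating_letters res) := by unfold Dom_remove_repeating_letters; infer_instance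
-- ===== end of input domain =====

-- B sorts each word's letters and checks adjacent characters differ, instead of A's repeated w.count scans; same return value, alternative algorithm.


-- ===== PORT A =====
-- for c in w: if w.count(c) > 1: break / else: append w
def remove_repeating_letters (res : List String) : List String :=
  res.foldl (fun out_res w =>
    if w.toList.any (fun c => decide (w.toList.count c > 1)) then out_res
    else out_res ++ [w]) []

-- ===== PORT B =====
-- s = sorted(w); keep w iff all adjacent pairs of s differ
def remove_repeating_letters_alt (res : List String) : List String :=
  res.foldl (fun out_res w =>
    let s := PySem.List.sorted w.toList (fun c => c) false
    if (s.zip s.tail).all (fun p => decide (p.1 ≠ p.2)) then out_res ++ [w]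
    else out_res) []

-- ===== PRECONDITION & SPEC =====
def Spec_remove_repeating_letters (res : List String) (out : List String) : Prop := out = remove_repeating_letters_alt res
instance (res : List String) (out : List String) : Decidable (Spec_remove_repeating_letters res out) := by unfold Spec_remove_repeating_letters; infer_instance

-- ===== CLAIM (what is proved, stated in full; the proofs are below) =====
def Claim_equal_remove_repeating_letters : Prop := ∀ (res : List String), Dom_remove_repeating_letters res → Spec_remove_repeating_letters res (remove_repeating_letters res)

-- ===== LEMMAS AND PROOFS =====

-- the zip-with-tail test is exactly "no two adjacent elements are equal"
lemma zip_tail_all_ne_iff_isChain (s : List Char) :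
    ((s.zip s.tail).all (fun p => decide (p.1 ≠ p.2)) = true) ↔ s.IsChain (· ≠ ·) := by
  induction s with
  | nil => simp [List.isChain_nil]
  | cons a t ih =>
    cases t with
    | nil => simp [List.isChain_singleton]
    | cons b u =>
      simp only [List.tail_cons, List.zip_cons_cons, List.all_cons, Bool.and_eq_true,
        decide_eq_true_eq, List.isChain_cons_cons] at *
      constructor
      · rintro ⟨h1, h2⟩; exact ⟨h1, ih.mp h2⟩
      · rintro ⟨h1, h2⟩; exact ⟨h1, ih.mpr h2⟩

-- on a weakly sorted list, adjacent distinctness is exactly Nodup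
lemma sorted_isChain_ne_iff_nodup (s : List Char) (hp : s.Pairwise (· ≤ ·)) :
    s.IsChain (· ≠ ·) ↔ s.Nodup := by
  constructor
  · intro hc
    have hlt : s.IsChain (· < ·) := by
      have hle : s.IsChain (· ≤ ·) := hp.isChain
      rw [List.isChain_iff_getElem] at hle hc ⊢
      intro i h
      exact lt_of_le_of_ne (hle i h) (hc i h)
    exact (List.isChain_iff_pairwise.mp hlt).imp ne_of_lt
  · intro hn
    exact hn.isChain

-- per-word: A's test fails exactly when B's sorted-adjacent test succeeds
lemma word_cond (w : String) :
    (w.toList.any (fun c => decide (w.toList.count c > 1)))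
      = !((PySem.List.sorted w.toList (fun c => c) false).zip
            (PySem.List.sorted w.toList (fun c => c) false).tail).all (fun p => decide (p.1 ≠ p.2)) := by
  set l := w.toList
  set s := PySem.List.sorted l (fun c => c) false with hs
  have hperm : s.Perm l := PySem.List.sorted_perm l (fun c => c) false
  have hp : s.Pairwise (· ≤ ·) := PySem.List.sorted_pairwise l (fun c => c)
  have hiff : ((s.zip s.tail).all (fun p => decide (p.1 ≠ p.2)) = true) ↔ l.Nodup := by
    rw [zip_tail_all_ne_iff_isChain, sorted_isChain_ne_iff_nodup s hp]
    exact hperm.nodup_iff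
  have haiff : (l.any (fun c => decide (l.count c > 1)) = true) ↔ ¬ l.Nodup := by
    simp only [List.any_eq_true, decide_eq_true_eq, List.nodup_iff_count_le_one]
    constructor
    · rintro ⟨c, _, hc⟩ h; exact absurd (h c) (by omega)
    · intro h
      push_neg at h
      obtain ⟨c, hc⟩ := h
      have hmem : c ∈ l := List.count_pos_iff.mp (by omega)
      exact ⟨c, hmem, by omega⟩
  cases hA : l.any (fun c => decide (l.count c > 1)) with
  | true =>
    have hB : ((s.zip s.tail).all (fun p => decide (p.1 ≠ p.2))) = false := by
      cases hB : (s.zip s.tail).all (fun p => decide (p.1 ≠ p.2)) with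
      | true => exact absurd (hiff.mp hB) (haiff.mp hA)
      | false => rfl
    rw [hB]; rfl
  | false =>
    have hnd : l.Nodup := by
      by_contra hnd
      rw [haiff.mpr hnd] at hA; cases hA
    rw [hiff.mpr hnd]; rfl

-- ===== VERDICT (by name: the statement is the Claim_ definition above) =====
theorem remove_repeating_letters_spec : Claim_equal_remove_repeating_letters := by
  intro res _
  unfold Spec_remove_repeating_letters remove_repeating_letters remove_repeating_letters_alt
  congr 1
  funext out_res w
  simp only [word_cond w]
  cases ((PySem.List.sorted w.toList (fun c => c) false).zip
      (PySem.List.sorted w.toList (fun c => c) false).tail).all (fun p => decide (p.1 ≠ p.2)) <;> simp
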